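-- pv_equiv track=rewrite | github.com/Jeanraymond601/api_backend | app/services/language_detector.py | _are_languages_similar
-- ===== SOURCE A (Python) =====
-- def _are_languages_similar(lang1: str, lang2: str) -> bool:
--     """Check if two languages are similar/dialects"""
--     similar_groups = [
--         ['fr', 'fr-ca', 'fr-fr'],  # French variants
--         ['en', 'en-us', 'en-gb'],  # English variants
--         ['pt', 'pt-br', 'pt-pt']   # Portuguese variants
--     ]
--
--     for group in similar_groups:
--         if lang1 in group and lang2 in group:
--             return True
--
--     return False
-- ===== SOURCE B (Python) =====
-- _GROUP_INDEX = {
--     code: i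
--     for i, group in enumerate([
--         ['fr', 'fr-ca', 'fr-fr'],  # French variants
--         ['en', 'en-us', 'en-gb'],  # English variants
--         ['pt', 'pt-br', 'pt-pt'],  # Portuguese variants
--     ])
--     for code in group
-- }
--
--
-- def _are_languages_similar(lang1: str, lang2: str) -> bool:
--     """Check if two languages are similar/dialects"""
--     return lang1 in _GROUP_INDEX and _GROUP_INDEX[lang1] == _GROUP_INDEX.get(lang2)
-- ===== Notes on version B (the rewrite author's own statement) =====
-- stated objective: simpler
-- what changed: Replaced the per-call scan over the three group lists with a module-level precomputed dict mapping each code to its group index; the check becomes a guarded pair of O(1) lookups (explicit membership guard so unknown codes never compare equal).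
import Mathlib
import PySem

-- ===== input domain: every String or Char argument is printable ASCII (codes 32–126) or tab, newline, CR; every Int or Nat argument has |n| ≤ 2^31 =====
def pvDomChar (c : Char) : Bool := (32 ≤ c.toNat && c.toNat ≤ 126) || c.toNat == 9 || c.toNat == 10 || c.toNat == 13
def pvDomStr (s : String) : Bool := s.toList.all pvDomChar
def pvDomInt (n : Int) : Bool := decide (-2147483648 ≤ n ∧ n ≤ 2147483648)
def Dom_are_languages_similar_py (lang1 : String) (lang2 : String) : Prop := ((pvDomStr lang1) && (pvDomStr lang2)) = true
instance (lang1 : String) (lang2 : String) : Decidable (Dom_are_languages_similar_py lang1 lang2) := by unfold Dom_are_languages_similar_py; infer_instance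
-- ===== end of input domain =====

-- B replaces A's scan over the list of groups by a precomputed code→group-index dict with a guarded lookup (objective: simpler/idiomatic, no speed claim).


-- ===== PORT A =====
-- the literal 'similar_groups' list from A
def pvSimilarGroups : List (List String) :=
  [["fr", "fr-ca", "fr-fr"],
   ["en", "en-us", "en-gb"],
   ["pt", "pt-br", "pt-pt"]]

-- 'for group in similar_groups: if lang1 in group and lang2 in group: return True' / 'return False'
def pvGroupLoop (lang1 lang2 : String) : List (List String) → Bool
  | [] => false
  | g :: rest =>
    if g.contains lang1 && g.contains lang2 then true
    else pvGroupLoop lang1 lang2 rest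

def are_languages_similar_py (lang1 : String) (lang2 : String) : Bool :=
  pvGroupLoop lang1 lang2 pvSimilarGroups

-- ===== PORT B =====
-- module-level dict comprehension: {code: i for i, group in enumerate(groups) for code in group}
def pvGroupIndex : PySem.Dict String Int :=
  (PySem.List.enumerate pvSimilarGroups).foldl
    (fun d ig => ig.2.foldl (fun d code => d.insert code ig.1) d)
    PySem.Dict.empty

-- 'return lang1 in _GROUP_INDEX and _GROUP_INDEX[lang1] == _GROUP_INDEX.get(lang2)'
-- (with lang1 present, 'd[lang1] == d.get(lang2)' is exactly 'get? lang1 == get? lang2' on Option)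
def are_languages_similar_py_alt (lang1 : String) (lang2 : String) : Bool :=
  pvGroupIndex.contains lang1 && (pvGroupIndex.get? lang1 == pvGroupIndex.get? lang2)

-- ===== PRECONDITION & SPEC =====
def Spec_are_languages_similar_py (lang1 : String) (lang2 : String) (out : Bool) : Prop := out = are_languages_similar_py_alt lang1 lang2
instance (lang1 : String) (lang2 : String) (out : Bool) : Decidable (Spec_are_languages_similar_py lang1 lang2 out) := by unfold Spec_are_languages_similar_py; infer_instance

-- ===== CLAIM (what is proved, stated in full; the proofs are below) =====
def Claim_equal_are_languages_similar_py : Prop := ∀ (lang1 : String) (lang2 : String), Dom_are_languages_similar_py lang1 lang2 → Spec_are_languages_similar_py lang1 lang2 (are_languages_similar_py lang1 lang2)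

-- ===== LEMMAS AND PROOFS =====

-- closed form of the dict lookup (get?_insert checks the last insertion first)
theorem pvGroupIndex_get? (x : String) : pvGroupIndex.get? x =
    if x = "pt-pt" then some 2 else if x = "pt-br" then some 2 else if x = "pt" then some 2
    else if x = "en-gb" then some 1 else if x = "en-us" then some 1 else if x = "en" then some 1
    else if x = "fr-fr" then some 0 else if x = "fr-ca" then some 0 else if x = "fr" then some 0
    else none := by
  simp [pvGroupIndex, pvSimilarGroups, PySem.List.enumerate,
        PySem.Dict.get?_insert, PySem.Dict.get?_empty]

-- closed form of the membership test
theorem pvGroupIndex_contains (x : String) : pvGroupIndex.contains x =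
    (decide (x = "pt-pt") || decide (x = "pt-br") || decide (x = "pt")
     || decide (x = "en-gb") || decide (x = "en-us") || decide (x = "en")
     || decide (x = "fr-fr") || decide (x = "fr-ca") || decide (x = "fr")) := by
  rw [PySem.Dict.contains_eq_isSome_get?, pvGroupIndex_get? x]
  split_ifs <;> simp_all

-- ===== VERDICT (by name: the statement is the Claim_ definition above) =====
set_option maxHeartbeats 1000000 in
theorem are_languages_similar_py_spec : Claim_equal_are_languages_similar_py := by
  intro l1 l2 hD
  clear hD
  unfold Spec_are_languages_similar_py are_languages_similar_py are_languages_similar_py_alt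
  rw [pvGroupIndex_contains l1, pvGroupIndex_get? l1, pvGroupIndex_get? l2]
  simp only [pvSimilarGroups, pvGroupLoop, List.contains_cons, List.contains_nil]
  by_cases h0 : l1 = "fr"
  · subst h0
    by_cases g0 : l2 = "fr"
    · subst g0; decide
    by_cases g1 : l2 = "fr-ca"
    · subst g1; decide
    by_cases g2 : l2 = "fr-fr"
    · subst g2; decide
    by_cases g3 : l2 = "en"
    · subst g3; decide
    by_cases g4 : l2 = "en-us"
    · subst g4; decide
    by_cases g5 : l2 = "en-gb"
    · subst g5; decide
    by_cases g6 : l2 = "pt"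
    · subst g6; decide
    by_cases g7 : l2 = "pt-br"
    · subst g7; decide
    by_cases g8 : l2 = "pt-pt"
    · subst g8; decide
    simp_all
  by_cases h1 : l1 = "fr-ca"
  · subst h1
    by_cases g0 : l2 = "fr"
    · subst g0; decide
    by_cases g1 : l2 = "fr-ca"
    · subst g1; decide
    by_cases g2 : l2 = "fr-fr"
    · subst g2; decide
    by_cases g3 : l2 = "en"
    · subst g3; decide
    by_cases g4 : l2 = "en-us"
    · subst g4; decide
    by_cases g5 : l2 = "en-gb"
    · subst g5; decide
    by_cases g6 : l2 = "pt"
    · subst g6; decide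
    by_cases g7 : l2 = "pt-br"
    · subst g7; decide
    by_cases g8 : l2 = "pt-pt"
    · subst g8; decide
    simp_all
  by_cases h2 : l1 = "fr-fr"
  · subst h2
    by_cases g0 : l2 = "fr"
    · subst g0; decide
    by_cases g1 : l2 = "fr-ca"
    · subst g1; decide
    by_cases g2 : l2 = "fr-fr"
    · subst g2; decide
    by_cases g3 : l2 = "en"
    · subst g3; decide
    by_cases g4 : l2 = "en-us"
    · subst g4; decide
    by_cases g5 : l2 = "en-gb"
    · subst g5; decide
    by_cases g6 : l2 = "pt"
    · subst g6; decide
    by_cases g7 : l2 = "pt-br"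
    · subst g7; decide
    by_cases g8 : l2 = "pt-pt"
    · subst g8; decide
    simp_all
  by_cases h3 : l1 = "en"
  · subst h3
    by_cases g0 : l2 = "fr"
    · subst g0; decide
    by_cases g1 : l2 = "fr-ca"
    · subst g1; decide
    by_cases g2 : l2 = "fr-fr"
    · subst g2; decide
    by_cases g3 : l2 = "en"
    · subst g3; decide
    by_cases g4 : l2 = "en-us"
    · subst g4; decide
    by_cases g5 : l2 = "en-gb"
    · subst g5; decide
    by_cases g6 : l2 = "pt"
    · subst g6; decide
    by_cases g7 : l2 = "pt-br"
    · subst g7; decide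
    by_cases g8 : l2 = "pt-pt"
    · subst g8; decide
    simp_all
  by_cases h4 : l1 = "en-us"
  · subst h4
    by_cases g0 : l2 = "fr"
    · subst g0; decide
    by_cases g1 : l2 = "fr-ca"
    · subst g1; decide
    by_cases g2 : l2 = "fr-fr"
    · subst g2; decide
    by_cases g3 : l2 = "en"
    · subst g3; decide
    by_cases g4 : l2 = "en-us"
    · subst g4; decide
    by_cases g5 : l2 = "en-gb"
    · subst g5; decide
    by_cases g6 : l2 = "pt"
    · subst g6; decide
    by_cases g7 : l2 = "pt-br"
    · subst g7; decide
    by_cases g8 : l2 = "pt-pt"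
    · subst g8; decide
    simp_all
  by_cases h5 : l1 = "en-gb"
  · subst h5
    by_cases g0 : l2 = "fr"
    · subst g0; decide
    by_cases g1 : l2 = "fr-ca"
    · subst g1; decide
    by_cases g2 : l2 = "fr-fr"
    · subst g2; decide
    by_cases g3 : l2 = "en"
    · subst g3; decide
    by_cases g4 : l2 = "en-us"
    · subst g4; decide
    by_cases g5 : l2 = "en-gb"
    · subst g5; decide
    by_cases g6 : l2 = "pt"
    · subst g6; decide
    by_cases g7 : l2 = "pt-br"
    · subst g7; decide
    by_cases g8 : l2 = "pt-pt"
    · subst g8; decide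
    simp_all
  by_cases h6 : l1 = "pt"
  · subst h6
    by_cases g0 : l2 = "fr"
    · subst g0; decide
    by_cases g1 : l2 = "fr-ca"
    · subst g1; decide
    by_cases g2 : l2 = "fr-fr"
    · subst g2; decide
    by_cases g3 : l2 = "en"
    · subst g3; decide
    by_cases g4 : l2 = "en-us"
    · subst g4; decide
    by_cases g5 : l2 = "en-gb"
    · subst g5; decide
    by_cases g6 : l2 = "pt"
    · subst g6; decide
    by_cases g7 : l2 = "pt-br"
    · subst g7; decide
    by_cases g8 : l2 = "pt-pt"
    · subst g8; decide
    simp_all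
  by_cases h7 : l1 = "pt-br"
  · subst h7
    by_cases g0 : l2 = "fr"
    · subst g0; decide
    by_cases g1 : l2 = "fr-ca"
    · subst g1; decide
    by_cases g2 : l2 = "fr-fr"
    · subst g2; decide
    by_cases g3 : l2 = "en"
    · subst g3; decide
    by_cases g4 : l2 = "en-us"
    · subst g4; decide
    by_cases g5 : l2 = "en-gb"
    · subst g5; decide
    by_cases g6 : l2 = "pt"
    · subst g6; decide
    by_cases g7 : l2 = "pt-br"
    · subst g7; decide
    by_cases g8 : l2 = "pt-pt"
    · subst g8; decide
    simp_all
  by_cases h8 : l1 = "pt-pt"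
  · subst h8
    by_cases g0 : l2 = "fr"
    · subst g0; decide
    by_cases g1 : l2 = "fr-ca"
    · subst g1; decide
    by_cases g2 : l2 = "fr-fr"
    · subst g2; decide
    by_cases g3 : l2 = "en"
    · subst g3; decide
    by_cases g4 : l2 = "en-us"
    · subst g4; decide
    by_cases g5 : l2 = "en-gb"
    · subst g5; decide
    by_cases g6 : l2 = "pt"
    · subst g6; decide
    by_cases g7 : l2 = "pt-br"
    · subst g7; decide
    by_cases g8 : l2 = "pt-pt"
    · subst g8; decide
    simp_all
  simp_all
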